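-- pv_equiv track=rewrite | github.com/drdileepunni/llm_wiki | app/backend/services/ingest_pipeline.py | _section_enrichment_context
-- ===== SOURCE A (Python) =====
-- def _section_enrichment_context(existing_content: str) -> str:
--     """
--     For op=update on entity/concept pages: build a per-section context block
--     showing what is already written in each ## section so the LLM only adds
--     genuinely new content rather than duplicating existing points.
--     """
--     lines = existing_content.splitlines()
--     # Skip YAML frontmatter
--     fm_end = 0
--     if lines and lines[0].strip() == "---":
--         for i, line in enumerate(lines[1:], 1):
--             if line.strip() == "---":
--                 fm_end = i + 1
--                 break
--
--     sections: list[tuple[str, str]] = []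
--     current_heading: str | None = None
--     current_body: list[str] = []
--
--     for line in lines[fm_end:]:
--         if line.startswith("## "):
--             if current_heading is not None:
--                 sections.append((current_heading, "\n".join(current_body).strip()))
--             current_heading = line[3:].strip()
--             current_body = []
--         elif current_heading is not None:
--             current_body.append(line)
--     if current_heading is not None:
--         sections.append((current_heading, "\n".join(current_body).strip()))
--
--     if not sections:
--         return ""
--
--     parts = []
--     for heading, body in sections:
--         if body:
--             parts.append(
--                 f"## {heading}\n"
--                 f"Current content (DO NOT repeat or rephrase — only append new points from this source):\n"
--                 f"{body}"
--             )
--         else: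
--             parts.append(f"## {heading}\n(empty — create from source if covered)")
--
--     return (
--         "\nEXISTING SECTIONS — for each, add ONLY what is new from this source:\n\n"
--         + "\n\n".join(parts)
--         + "\n"
--     )
-- ===== SOURCE B (Python) =====
-- def _section_enrichment_context(existing_content: str) -> str:
--     lines = existing_content.splitlines()
--     # Skip YAML frontmatter (same rule as before: fm_end = 0 when unclosed)
--     fm_end = 0
--     if lines and lines[0].strip() == "---":
--         for i, line in enumerate(lines[1:], 1):
--             if line.strip() == "---":
--                 fm_end = i + 1
--                 break
--
--     # Drop everything before the first '## ' heading, then split the rest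
--     # into (heading, body) chunks by scanning ahead to the next heading.
--     rest = lines[fm_end:]
--     k = 0
--     while k < len(rest) and not rest[k].startswith("## "):
--         k += 1
--     rest = rest[k:]
--
--     sections: list[tuple[str, str]] = []
--     while rest:
--         heading = rest[0][3:].strip()
--         j = 1
--         while j < len(rest) and not rest[j].startswith("## "):
--             j += 1
--         sections.append((heading, "\n".join(rest[1:j]).strip()))
--         rest = rest[j:]
--
--     if not sections:
--         return ""
--
--     def fmt(heading: str, body: str) -> str:
--         if body:
--             return (
--                 f"## {heading}\n"
--                 f"Current content (DO NOT repeat or rephrase — only append new points from this source):\n"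
--                 f"{body}"
--             )
--         return f"## {heading}\n(empty — create from source if covered)"
--
--     return (
--         "\nEXISTING SECTIONS — for each, add ONLY what is new from this source:\n\n"
--         + "\n\n".join(fmt(h, b) for h, b in sections)
--         + "\n"
--     )
-- ===== Notes on version B (the rewrite author's own statement) =====
-- stated objective: alternative
-- what changed: Replaced A's stateful single-pass accumulator (current_heading/current_body threaded through the loop with a final flush) by a skip-to-first-heading scan followed by chunking: each section is obtained by scanning ahead to the next section heading and slicing the lines in between; formatting uses a generator expression instead of an appended parts list.
import Mathlib
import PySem

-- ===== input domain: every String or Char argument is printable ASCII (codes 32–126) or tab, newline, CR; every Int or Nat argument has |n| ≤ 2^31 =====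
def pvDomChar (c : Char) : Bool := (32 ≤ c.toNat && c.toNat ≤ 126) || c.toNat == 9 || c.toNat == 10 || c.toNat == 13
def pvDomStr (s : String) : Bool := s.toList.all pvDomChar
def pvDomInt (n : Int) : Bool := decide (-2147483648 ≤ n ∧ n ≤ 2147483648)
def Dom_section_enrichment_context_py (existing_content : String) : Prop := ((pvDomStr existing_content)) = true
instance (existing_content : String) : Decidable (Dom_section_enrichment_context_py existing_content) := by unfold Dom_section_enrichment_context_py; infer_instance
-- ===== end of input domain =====

-- B replaces A's stateful accumulator loop (current_heading/current_body threaded through one pass)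
-- by a skip-to-first-heading scan plus chunking at heading indices; objective: alternative decomposition, same cost.

-- Shared by both Pythons verbatim: the frontmatter-skip loop and the per-section format string.
def pvFmFind : List String → Nat → Nat
  | [], _ => 0
  | l :: rest, i => if PySem.Str.strip l = "---" then i + 1 else pvFmFind rest (i + 1)

def pvFmEnd : List String → Nat
  | [] => 0
  | l :: rest => if PySem.Str.strip l = "---" then pvFmFind rest 1 else 0

def pvFmt (heading : String) (body : String) : String :=
  if body ≠ "" then
    "## " ++ heading ++ "\nCurrent content (DO NOT repeat or rephrase — only append new points from this source):\n" ++ body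
  else
    "## " ++ heading ++ "\n(empty — create from source if covered)"

def pvIsHead (l : String) : Bool := PySem.Str.startswith l "## "

-- ===== PORT A =====
-- A's single pass: state (current_heading, current_body, sections), final flush after the loop.
def pvLoopA : List String → Option String × List String × List (String × String) → Option String × List String × List (String × String)
  | [], st => st
  | l :: rest, (cur, body, secs) =>
    if pvIsHead l then
      pvLoopA rest (some (PySem.Str.strip (PySem.Str.slice l (some 3) none)), [],
        match cur with
        | some h => secs ++ [(h, PySem.Str.strip (PySem.Str.join "\n" body))]
        | none => secs)
    else
      match cur with
      | some _ => pvLoopA rest (cur, body ++ [l], secs)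
      | none => pvLoopA rest (cur, body, secs)

def pvFinishA (st : Option String × List String × List (String × String)) : List (String × String) :=
  match st.1 with
  | some h => st.2.2 ++ [(h, PySem.Str.strip (PySem.Str.join "\n" st.2.1))]
  | none => st.2.2

def section_enrichment_context_py (existing_content : String) : String :=
  let lines := PySem.Str.splitlines existing_content
  let fm := pvFmEnd lines
  let sections := pvFinishA (pvLoopA (lines.drop fm) (none, [], []))
  if sections = [] then ""
  else
    let parts := sections.foldl (fun acc hb => acc ++ [pvFmt hb.1 hb.2]) []
    "\nEXISTING SECTIONS — for each, add ONLY what is new from this source:\n\n"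
      ++ PySem.Str.join "\n\n" parts ++ "\n"

-- ===== PORT B =====
-- B: drop lines up to the first heading, then chunk the tail at heading boundaries.
def pvSectionsB : List String → List (String × String)
  | [] => []
  | l :: rest =>
      (PySem.Str.strip (PySem.Str.slice l (some 3) none),
       PySem.Str.strip (PySem.Str.join "\n" (rest.takeWhile (fun x => !pvIsHead x)))) ::
      pvSectionsB (rest.dropWhile (fun x => !pvIsHead x))
termination_by ls => ls.length
decreasing_by
  exact Nat.lt_succ_of_le (List.length_dropWhile_le _ _)

def section_enrichment_context_py_alt (existing_content : String) : String :=
  let lines := PySem.Str.splitlines existing_content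
  let rest := (lines.drop (pvFmEnd lines)).dropWhile (fun x => !pvIsHead x)
  let sections := pvSectionsB rest
  if sections = [] then ""
  else
    "\nEXISTING SECTIONS — for each, add ONLY what is new from this source:\n\n"
      ++ PySem.Str.join "\n\n" (sections.map (fun hb => pvFmt hb.1 hb.2)) ++ "\n"

-- ===== PRECONDITION & SPEC =====
def Spec_section_enrichment_context_py (existing_content : String) (out : String) : Prop := out = section_enrichment_context_py_alt existing_content
instance (existing_content : String) (out : String) : Decidable (Spec_section_enrichment_context_py existing_content out) := by unfold Spec_section_enrichment_context_py; infer_instance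

-- ===== CLAIM (what is proved, stated in full; the proofs are below) =====
def Claim_equal_section_enrichment_context_py : Prop := ∀ (existing_content : String), Dom_section_enrichment_context_py existing_content → Spec_section_enrichment_context_py existing_content (section_enrichment_context_py existing_content)

-- ===== LEMMAS AND PROOFS =====

theorem pvSectionsB_nil : pvSectionsB [] = [] := by rw [pvSectionsB.eq_def]

theorem pvSectionsB_cons (l : String) (rest : List String) :
    pvSectionsB (l :: rest) =
      (PySem.Str.strip (PySem.Str.slice l (some 3) none),
       PySem.Str.strip (PySem.Str.join "\n" (rest.takeWhile (fun x => !pvIsHead x)))) ::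
      pvSectionsB (rest.dropWhile (fun x => !pvIsHead x)) := by rw [pvSectionsB.eq_def]

-- With an open section (current_heading = some h), A's remaining loop produces h paired with the
-- pending body extended by the lines up to the next heading, then B's chunks of the rest.
theorem pvLoopA_some (ls : List String) :
    ∀ (h : String) (body : List String) (secs : List (String × String)),
    pvFinishA (pvLoopA ls (some h, body, secs)) =
      secs ++ (h, PySem.Str.strip (PySem.Str.join "\n" (body ++ ls.takeWhile (fun x => !pvIsHead x)))) ::
        pvSectionsB (ls.dropWhile (fun x => !pvIsHead x)) := by
  induction ls with
  | nil => intro h body secs; simp [pvLoopA, pvFinishA, pvSectionsB_nil]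
  | cons l rest ih =>
    intro h body secs
    rw [List.takeWhile_cons, List.dropWhile_cons]
    by_cases hl : pvIsHead l = true
    · rw [pvLoopA.eq_def]
      simp [hl, ih, pvSectionsB_cons]
    · rw [pvLoopA.eq_def]
      rw [Bool.not_eq_true] at hl
      simp [hl, ih, List.append_assoc]

-- Before the first heading (current_heading = None) A skips lines; from the first heading on,
-- its result is exactly B's chunk list.
theorem pvLoopA_none (ls : List String) :
    pvFinishA (pvLoopA ls (none, [], [])) = pvSectionsB (ls.dropWhile (fun x => !pvIsHead x)) := by
  induction ls with
  | nil => simp [pvLoopA, pvFinishA, pvSectionsB_nil]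
  | cons l rest ih =>
    rw [List.dropWhile_cons]
    by_cases hl : pvIsHead l = true
    · rw [pvLoopA.eq_def]
      simp [hl, pvLoopA_some, pvSectionsB_cons]
    · rw [pvLoopA.eq_def]
      rw [Bool.not_eq_true] at hl
      simp [hl, ih]

-- ===== VERDICT (by name: the statement is the Claim_ definition above) =====
theorem section_enrichment_context_py_spec : Claim_equal_section_enrichment_context_py := by
  intro s _
  unfold Spec_section_enrichment_context_py section_enrichment_context_py section_enrichment_context_py_alt
  simp only [pvLoopA_none, PySem.List.foldl_append_singleton_eq_map, List.nil_append]
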